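-- pv_equiv track=rewrite | github.com/Ark-Barua/CAPTRIX | app/core/win_devices.py | _dshow_system_audio_candidates
-- ===== SOURCE A (Python) =====
-- from typing import List
--
-- def _looks_like_system_audio_source(device_name: str) -> bool:
--     lower = device_name.lower()
--     system_keywords = (
--         "stereo mix",
--         "what u hear",
--         "wave out",
--         "loopback",
--         "speaker",
--         "speakers",
--         "headphone",
--         "line out",
--         "digital output",
--     )
--     return any(keyword in lower for keyword in system_keywords)
--
-- def _looks_like_mic_source(device_name: str) -> bool:
--     lower = device_name.lower()
--     mic_keywords = ("microphone", "mic ", "micarray", "mic array", "line in", "line-in")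
--     return any(keyword in lower for keyword in mic_keywords)
--
-- def _dshow_system_audio_candidates(audio_devices: List[str]) -> List[str]:
--     primary: List[str] = []
--     secondary: List[str] = []
--     tertiary: List[str] = []
--     for name in audio_devices:
--         if _looks_like_mic_source(name):
--             continue
--         if _looks_like_system_audio_source(name):
--             primary.append(name)
--         elif "output" in name.lower() or "render" in name.lower():
--             secondary.append(name)
--         else:
--             tertiary.append(name)
--
--     if primary:
--         return list(dict.fromkeys(primary))
--     if secondary:
--         return list(dict.fromkeys(secondary))
--     if tertiary:
--         return list(dict.fromkeys(tertiary))
--     return []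
-- ===== SOURCE B (Python) =====
-- from typing import List
--
-- def _looks_like_system_audio_source(device_name: str) -> bool:
--     lower = device_name.lower()
--     system_keywords = (
--         "stereo mix",
--         "what u hear",
--         "wave out",
--         "loopback",
--         "speaker",
--         "speakers",
--         "headphone",
--         "line out",
--         "digital output",
--     )
--     return any(keyword in lower for keyword in system_keywords)
--
-- def _looks_like_mic_source(device_name: str) -> bool:
--     lower = device_name.lower()
--     mic_keywords = ("microphone", "mic ", "micarray", "mic array", "line in", "line-in")
--     return any(keyword in lower for keyword in mic_keywords)
--
-- def _priority(device_name: str) -> int: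
--     if _looks_like_system_audio_source(device_name):
--         return 0
--     lower = device_name.lower()
--     if "output" in lower or "render" in lower:
--         return 1
--     return 2
--
-- def _dshow_system_audio_candidates(audio_devices: List[str]) -> List[str]:
--     rest = [name for name in audio_devices if not _looks_like_mic_source(name)]
--     if not rest:
--         return []
--     best = min(_priority(name) for name in rest)
--     return list(dict.fromkeys(name for name in rest if _priority(name) == best))
-- ===== Notes on version B (the rewrite author's own statement) =====
-- stated objective: alternative
-- what changed: Replaces A's single-pass partition into three bucket lists (then first-nonempty choice) by a per-device priority rank: B filters out mic devices, takes the minimum rank over the remainder, and returns the dedup of the devices at that rank.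
import Mathlib
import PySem

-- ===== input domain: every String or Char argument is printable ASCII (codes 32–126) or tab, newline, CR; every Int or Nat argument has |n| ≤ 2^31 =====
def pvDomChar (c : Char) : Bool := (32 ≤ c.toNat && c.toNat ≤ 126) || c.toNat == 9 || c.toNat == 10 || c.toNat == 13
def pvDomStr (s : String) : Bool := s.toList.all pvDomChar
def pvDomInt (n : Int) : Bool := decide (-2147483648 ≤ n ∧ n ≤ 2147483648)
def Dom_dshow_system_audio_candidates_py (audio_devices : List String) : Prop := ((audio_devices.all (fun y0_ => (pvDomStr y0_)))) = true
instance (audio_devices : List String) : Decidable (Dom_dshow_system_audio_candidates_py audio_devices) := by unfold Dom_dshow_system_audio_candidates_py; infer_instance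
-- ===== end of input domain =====

-- B replaces A's one-pass three-bucket partition by a rank function: take the minimum
-- priority rank over the non-mic devices and return the dedup of the devices at that
-- rank (objective: alternative decomposition, same cost).

-- ===== PORT A =====
-- shared module helper: _looks_like_system_audio_source
def pvLooksSys (device_name : String) : Bool :=
  let lower := PySem.Str.lower device_name
  [("stereo mix" : String), "what u hear", "wave out", "loopback", "speaker",
   "speakers", "headphone", "line out", "digital output"].any
    (fun keyword => PySem.Str.isIn keyword lower)

-- shared module helper: _looks_like_mic_source
def pvLooksMic (device_name : String) : Bool :=
  let lower := PySem.Str.lower device_name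
  [("microphone" : String), "mic ", "micarray", "mic array", "line in", "line-in"].any
    (fun keyword => PySem.Str.isIn keyword lower)

-- A's for-loop over audio_devices with the three bucket accumulators
def pvLoopA : List String → List String × List String × List String → List String × List String × List String
  | [], acc => acc
  | name :: rest, (p, s, t) =>
    if pvLooksMic name then pvLoopA rest (p, s, t)
    else if pvLooksSys name then pvLoopA rest (p ++ [name], s, t)
    else if PySem.Str.isIn "output" (PySem.Str.lower name) || PySem.Str.isIn "render" (PySem.Str.lower name) then
      pvLoopA rest (p, s ++ [name], t)
    else pvLoopA rest (p, s, t ++ [name])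

def dshow_system_audio_candidates_py (audio_devices : List String) : List String :=
  let acc := pvLoopA audio_devices ([], [], [])
  let primary := acc.1
  let secondary := acc.2.1
  let tertiary := acc.2.2
  if !primary.isEmpty then PySem.List.dedup primary
  else if !secondary.isEmpty then PySem.List.dedup secondary
  else if !tertiary.isEmpty then PySem.List.dedup tertiary
  else []

-- ===== PORT B =====
-- B helper: _priority
def pvPriority (device_name : String) : Int :=
  if pvLooksSys device_name then 0
  else
    let lower := PySem.Str.lower device_name
    if PySem.Str.isIn "output" lower || PySem.Str.isIn "render" lower then 1 else 2

def dshow_system_audio_candidates_py_alt (audio_devices : List String) : List String :=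
  let rest := audio_devices.filter (fun name => !pvLooksMic name)
  match rest with
  | [] => []
  | r :: rs =>
    let best := (rs.map pvPriority).foldl min (pvPriority r)   -- min(_priority(name) for name in rest)
    PySem.List.dedup (rest.filter (fun name => pvPriority name == best))

-- ===== PRECONDITION & SPEC =====
def Spec_dshow_system_audio_candidates_py (audio_devices : List String) (out : List String) : Prop := out = dshow_system_audio_candidates_py_alt audio_devices
instance (audio_devices : List String) (out : List String) : Decidable (Spec_dshow_system_audio_candidates_py audio_devices out) := by unfold Spec_dshow_system_audio_candidates_py; infer_instance

-- ===== CLAIM (what is proved, stated in full; the proofs are below) =====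
def Claim_equal_dshow_system_audio_candidates_py : Prop := ∀ (audio_devices : List String), Dom_dshow_system_audio_candidates_py audio_devices → Spec_dshow_system_audio_candidates_py audio_devices (dshow_system_audio_candidates_py audio_devices)

-- ===== LEMMAS AND PROOFS =====

lemma pvPriority_eq_zero (n : String) (h : pvLooksSys n = true) : pvPriority n = 0 := by
  simp [pvPriority, h]

lemma pvPriority_eq_one (n : String) (hs : pvLooksSys n = false)
    (ho : (PySem.Str.isIn "output" (PySem.Str.lower n) || PySem.Str.isIn "render" (PySem.Str.lower n)) = true) :
    pvPriority n = 1 := by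
  unfold pvPriority
  rw [if_neg (by simp [hs])]
  show (if (PySem.Str.isIn "output" (PySem.Str.lower n) || PySem.Str.isIn "render" (PySem.Str.lower n)) = true then (1:Int) else 2) = 1
  rw [if_pos ho]

lemma pvPriority_eq_two (n : String) (hs : pvLooksSys n = false)
    (ho : (PySem.Str.isIn "output" (PySem.Str.lower n) || PySem.Str.isIn "render" (PySem.Str.lower n)) = false) :
    pvPriority n = 2 := by
  unfold pvPriority
  rw [if_neg (by simp [hs])]
  show (if (PySem.Str.isIn "output" (PySem.Str.lower n) || PySem.Str.isIn "render" (PySem.Str.lower n)) = true then (1:Int) else 2) = 2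
  rw [if_neg (by simp at ho ⊢; exact ho)]

lemma pvPriority_range (n : String) : pvPriority n = 0 ∨ pvPriority n = 1 ∨ pvPriority n = 2 := by
  by_cases hs : pvLooksSys n = true
  · exact Or.inl (pvPriority_eq_zero n hs)
  · rw [Bool.not_eq_true] at hs
    by_cases ho : (PySem.Str.isIn "output" (PySem.Str.lower n) || PySem.Str.isIn "render" (PySem.Str.lower n)) = true
    · exact Or.inr (Or.inl (pvPriority_eq_one n hs ho))
    · rw [Bool.not_eq_true] at ho
      exact Or.inr (Or.inr (pvPriority_eq_two n hs ho))

-- the i-th bucket of A, expressed through B's rank function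
def pvBucket (i : Int) (xs : List String) : List String :=
  (xs.filter (fun n => !pvLooksMic n)).filter (fun n => pvPriority n == i)

lemma pvLoopA_spec (xs : List String) : ∀ p s t,
    pvLoopA xs (p, s, t) = (p ++ pvBucket 0 xs, s ++ pvBucket 1 xs, t ++ pvBucket 2 xs) := by
  induction xs with
  | nil => intro p s t; simp [pvLoopA, pvBucket]
  | cons n xs ih =>
    intro p s t
    by_cases hm : pvLooksMic n = true
    · have e : pvLoopA (n :: xs) (p, s, t) = pvLoopA xs (p, s, t) := by
        simp only [pvLoopA]; rw [if_pos hm]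
      have hb : ∀ i, pvBucket i (n :: xs) = pvBucket i xs := by
        intro i; simp [pvBucket, hm]
      rw [e, ih]; simp [hb]
    · rw [Bool.not_eq_true] at hm
      by_cases hsy : pvLooksSys n = true
      · have h0 := pvPriority_eq_zero n hsy
        have e : pvLoopA (n :: xs) (p, s, t) = pvLoopA xs (p ++ [n], s, t) := by
          simp only [pvLoopA]; rw [if_neg (by simp [hm]), if_pos hsy]
        rw [e, ih]
        simp [pvBucket, hm, h0]
      · rw [Bool.not_eq_true] at hsy
        by_cases ho : (PySem.Str.isIn "output" (PySem.Str.lower n) || PySem.Str.isIn "render" (PySem.Str.lower n)) = true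
        · have h1 := pvPriority_eq_one n hsy ho
          have e : pvLoopA (n :: xs) (p, s, t) = pvLoopA xs (p, s ++ [n], t) := by
            simp only [pvLoopA]; rw [if_neg (by simp [hm]), if_neg (by simp [hsy]), if_pos ho]
          rw [e, ih]
          simp [pvBucket, hm, h1]
        · rw [Bool.not_eq_true] at ho
          have h2 := pvPriority_eq_two n hsy ho
          have e : pvLoopA (n :: xs) (p, s, t) = pvLoopA xs (p, s, t ++ [n]) := by
            simp only [pvLoopA]; rw [if_neg (by simp [hm]), if_neg (by simp [hsy]), if_neg (by simp at ho ⊢; exact ho)]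
          rw [e, ih]
          simp [pvBucket, hm, h2]

-- ===== VERDICT (by name: the statement is the Claim_ definition above) =====
theorem dshow_system_audio_candidates_py_spec : Claim_equal_dshow_system_audio_candidates_py := by
  intro xs _
  unfold Spec_dshow_system_audio_candidates_py
  simp only [dshow_system_audio_candidates_py, dshow_system_audio_candidates_py_alt,
    pvLoopA_spec, List.nil_append]
  rcases hr : xs.filter (fun n => !pvLooksMic n) with _ | ⟨r, rs⟩
  · have b0 : ∀ i, pvBucket i xs = [] := by intro i; simp [pvBucket, hr]
    simp [b0]
  · have hbrest : ∀ i, pvBucket i xs = (r :: rs).filter (fun n => pvPriority n == i) := by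
      intro i; rw [pvBucket, hr]
    dsimp only
    set best := (rs.map pvPriority).foldl min (pvPriority r) with hbest
    have hmem : ∃ n ∈ r :: rs, pvPriority n = best := by
      rcases PySem.List.foldl_min_mem (rs.map pvPriority) (pvPriority r) with h1 | h1
    
      · rw [← hbest] at h1
        exact ⟨r, List.mem_cons_self, h1.symm⟩
      · rw [← hbest] at h1
        obtain ⟨n, hn, hpn⟩ := List.mem_map.mp h1
        exact ⟨n, List.mem_cons_of_mem _ hn, hpn⟩
    have hle : ∀ n ∈ r :: rs, best ≤ pvPriority n := by
      intro n hn
      have hpair := PySem.List.foldl_min_le (rs.map pvPriority) (pvPriority r)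
      rw [← hbest] at hpair
      rcases List.mem_cons.mp hn with rfl | hn'
      · exact hpair.1
      · exact hpair.2 _ (List.mem_map_of_mem hn')
    obtain ⟨n₀, hn₀, hpn₀⟩ := hmem
    have hbne : (r :: rs).filter (fun n => pvPriority n == best) ≠ [] := by
      intro hnil
      have := List.filter_eq_nil_iff.mp hnil n₀ hn₀
      simp [hpn₀] at this
    rcases pvPriority_range n₀ with h0 | h1 | h2
    · -- best = 0 : the primary bucket is nonempty
      have hb0 : best = 0 := by rw [← hpn₀, h0]
      rw [hb0] at hbne
      rw [hbrest 0, hbrest 1, hbrest 2, hb0]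
      rw [if_pos (by simpa using hbne)]
    · -- best = 1 : primary empty, secondary nonempty
      have hb1 : best = 1 := by rw [← hpn₀, h1]
      have hf0 : (r :: rs).filter (fun n => pvPriority n == (0:Int)) = [] := by
        apply List.filter_eq_nil_iff.mpr
        intro a ha
        have := hle a ha
        rw [hb1] at this
        simp; omega
      rw [hb1] at hbne
      rw [hbrest 0, hbrest 1, hbrest 2, hb1, hf0]
      rw [if_neg (by simp), if_pos (by simpa using hbne)]
    · -- best = 2 : primary and secondary empty, tertiary nonempty
      have hb2 : best = 2 := by rw [← hpn₀, h2]
      have hall : ∀ a ∈ r :: rs, pvPriority a = 2 := by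
        intro a ha
        have hge := hle a ha
        rw [hb2] at hge
        rcases pvPriority_range a with hx | hx | hx <;> omega
      have hf0 : (r :: rs).filter (fun n => pvPriority n == (0:Int)) = [] := by
        apply List.filter_eq_nil_iff.mpr
        intro a ha; have := hall a ha; simp [this]
      have hf1 : (r :: rs).filter (fun n => pvPriority n == (1:Int)) = [] := by
        apply List.filter_eq_nil_iff.mpr
        intro a ha; have := hall a ha; simp [this]
      rw [hb2] at hbne
      rw [hbrest 0, hbrest 1, hbrest 2, hb2, hf0, hf1]
      rw [if_neg (by simp), if_neg (by simp), if_pos (by simpa using hbne)]
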